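-- pv_equiv track=rewrite | github.com/prasadshirvandkar/Competitive_Prep | out/production/Competitive/pythoncodes/matrices/1d_to_2d_array.py | one_d_to_two_d_array
-- ===== SOURCE A (Python) =====
-- def one_d_to_two_d_array(original, m, n):
--     if m * n != len(original):
--         return []
--
--     two_d_arr = []
--     temp = []
--     for i in range(len(original)):
--         if len(temp) > 0 and len(temp) % n == 0:
--             two_d_arr.append(temp)
--             temp = []
--         temp.append(original[i])
--
--     if len(temp) > 0 and len(temp) % n == 0:
--         two_d_arr.append(temp)
--
--     return two_d_arr
-- ===== SOURCE B (Python) =====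
-- def one_d_to_two_d_array(original, m, n):
--     if m * n != len(original) or not original:
--         return []
--     return [original[i * n:(i + 1) * n] for i in range(m)]
-- ===== Notes on version B (the rewrite author's own statement) =====
-- stated objective: simpler
-- what changed: Replaces the element-by-element loop with its temp buffer and modulo-n flush test by directly producing the m rows as slices original[i*n:(i+1)*n].
-- intended difference: On nonempty input with both m and n negative and m*n == len(original) (e.g. m=-1, n=-2), A still returns rows of size |n| because its modulo test ignores the sign, while B returns [] as for any other invalid shape, which is the intended rejection of negative dimensions. — e.g. on one_d_to_two_d_array([1, 2], -1, -2): A returns [[1, 2]], B returns []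
import Mathlib
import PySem

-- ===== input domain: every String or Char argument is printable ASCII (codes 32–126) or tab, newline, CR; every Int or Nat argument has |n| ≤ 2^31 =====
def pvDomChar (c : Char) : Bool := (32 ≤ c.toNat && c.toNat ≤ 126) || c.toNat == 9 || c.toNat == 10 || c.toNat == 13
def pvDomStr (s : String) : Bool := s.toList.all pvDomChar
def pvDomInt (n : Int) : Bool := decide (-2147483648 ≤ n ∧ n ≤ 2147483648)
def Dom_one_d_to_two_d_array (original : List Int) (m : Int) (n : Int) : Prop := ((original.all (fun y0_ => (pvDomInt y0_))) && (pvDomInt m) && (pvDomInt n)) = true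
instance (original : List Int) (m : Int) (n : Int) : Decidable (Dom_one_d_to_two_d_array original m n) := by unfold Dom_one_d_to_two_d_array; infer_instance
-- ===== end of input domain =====

-- B replaces the element loop with temp buffer and modulo-n flush by direct row slicing; D_ states the
-- intended difference on negative dimensions (see below).

-- ===== PORT A =====
-- the 'if len(temp) > 0 and len(temp) % n == 0: two_d_arr.append(temp); temp = []' block (used in the
-- loop and, without the reset mattering, after it)
def pvFlushA (n : Int) (st : List (List Int) × List Int) : List (List Int) × List Int :=
  if 0 < st.2.length ∧ PySem.Int.mod (st.2.length : Int) n = 0 then (st.1 ++ [st.2], []) else st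

def one_d_to_two_d_array (original : List Int) (m : Int) (n : Int) : List (List Int) :=
  if m * n ≠ PySem.List.len original then []
  else
    let st := (PySem.List.pyRange 0 (PySem.List.len original)).foldl
      (fun (st : List (List Int) × List Int) i =>
        let st := pvFlushA n st
        (st.1, st.2 ++ [PySem.List.pyGetD original i 0]))
      ([], [])
    (pvFlushA n st).1

-- ===== PORT B =====
def one_d_to_two_d_array_alt (original : List Int) (m : Int) (n : Int) : List (List Int) :=
  if m * n ≠ PySem.List.len original ∨ original = [] then []
  else (PySem.List.pyRange 0 m).map
    (fun i => PySem.List.slice original (some (i * n)) (some ((i + 1) * n)))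

-- ===== PRECONDITION & SPEC =====
-- On nonempty input with m < 0, n < 0 and m*n == len(original), A still returns rows of size |n| (its
-- modulo test ignores the sign of n), while B returns [] as for every other invalid shape, the intended
-- rejection of negative dimensions.
def D_one_d_to_two_d_array (original : List Int) (m : Int) (n : Int) : Prop :=
  original ≠ [] ∧ m < 0 ∧ n < 0 ∧ m * n = (original.length : Int)
instance (original : List Int) (m : Int) (n : Int) : Decidable (D_one_d_to_two_d_array original m n) := by
  unfold D_one_d_to_two_d_array; infer_instance

def Spec_one_d_to_two_d_array (original : List Int) (m : Int) (n : Int) (out : List (List Int)) : Prop :=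
  ¬ D_one_d_to_two_d_array original m n → out = one_d_to_two_d_array_alt original m n
instance (original : List Int) (m : Int) (n : Int) (out : List (List Int)) : Decidable (Spec_one_d_to_two_d_array original m n out) := by
  unfold Spec_one_d_to_two_d_array; infer_instance

def pvDiffWitness_one_d_to_two_d_array : List Int × Int × Int := ([1, 2], -1, -2)
def pvDiffWitnessOut_one_d_to_two_d_array : (List (List Int)) × (List (List Int)) := ([[1, 2]], [])

-- ===== CLAIM (what is proved, stated in full; the proofs are below) =====
def Claim_unchanged_one_d_to_two_d_array : Prop := ∀ (original : List Int) (m : Int) (n : Int), Dom_one_d_to_two_d_array original m n → Spec_one_d_to_two_d_array original m n (one_d_to_two_d_array original m n)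
def Claim_changed_one_d_to_two_d_array : Prop := Dom_one_d_to_two_d_array (pvDiffWitness_one_d_to_two_d_array.1) (pvDiffWitness_one_d_to_two_d_array.2.1) (pvDiffWitness_one_d_to_two_d_array.2.2) ∧ D_one_d_to_two_d_array (pvDiffWitness_one_d_to_two_d_array.1) (pvDiffWitness_one_d_to_two_d_array.2.1) (pvDiffWitness_one_d_to_two_d_array.2.2) ∧ one_d_to_two_d_array (pvDiffWitness_one_d_to_two_d_array.1) (pvDiffWitness_one_d_to_two_d_array.2.1) (pvDiffWitness_one_d_to_two_d_array.2.2) = pvDiffWitnessOut_one_d_to_two_d_array.1 ∧ one_d_to_two_d_array_alt (pvDiffWitness_one_d_to_two_d_array.1) (pvDiffWitness_one_d_to_two_d_array.2.1) (pvDiffWitness_one_d_to_two_d_array.2.2) = pvDiffWitnessOut_one_d_to_two_d_array.2 ∧ pvDiffWitnessOut_one_d_to_two_d_array.1 ≠ pvDiffWitnessOut_one_d_to_two_d_array.2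
def Claim_exact_one_d_to_two_d_array : Prop := ∀ (original : List Int) (m : Int) (n : Int), Dom_one_d_to_two_d_array original m n → D_one_d_to_two_d_array original m n → one_d_to_two_d_array original m n ≠ one_d_to_two_d_array_alt original m n

-- ===== LEMMAS AND PROOFS =====

-- A's loop body, on the element itself
def pvStepA (n : Int) (st : List (List Int) × List Int) (x : Int) : List (List Int) × List Int :=
  let st := pvFlushA n st
  (st.1, st.2 ++ [x])

-- the list [xs.take N, …] of k chunks of size N
def pvChunk (N : ℕ) : ℕ → List Int → List (List Int)
  | 0, _ => []
  | k + 1, xs => xs.take N :: pvChunk N k (xs.drop N)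

theorem pvFlushA_iff (n : Int) (st : List (List Int) × List Int) :
    pvFlushA n st = if st.2 ≠ [] ∧ n.natAbs ∣ st.2.length then (st.1 ++ [st.2], []) else st := by
  unfold pvFlushA
  have hdvd : (n ∣ (st.2.length : Int)) ↔ n.natAbs ∣ st.2.length := by
    rw [← Int.natAbs_dvd, Int.natCast_dvd_natCast]
  have : (0 < st.2.length ∧ PySem.Int.mod (st.2.length : Int) n = 0) ↔
      (st.2 ≠ [] ∧ n.natAbs ∣ st.2.length) := by
    rw [PySem.Int.mod_eq_zero_iff_dvd, hdvd, List.length_pos_iff]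
  simp only [this]

theorem pv_fill (n : Int) :
    ∀ (ys : List Int) (acc : List (List Int)) (temp : List Int), temp ≠ [] →
      temp.length + ys.length ≤ n.natAbs →
      ys.foldl (pvStepA n) (acc, temp) = (acc, temp ++ ys)
  | [], acc, temp, _, _ => by simp
  | y :: ys, acc, temp, ht, hlen => by
    have hstep : pvStepA n (acc, temp) y = (acc, temp ++ [y]) := by
      unfold pvStepA
      rw [pvFlushA_iff n]
      have : ¬ (temp ≠ [] ∧ n.natAbs ∣ temp.length) := by
        rintro ⟨-, hd⟩
        have h1 : 0 < temp.length := List.length_pos_of_ne_nil ht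
        have h2 : temp.length < n.natAbs := by simp at hlen; omega
        have := Nat.le_of_dvd h1 hd
        omega
      simp [this]
    rw [List.foldl_cons, hstep,
      pv_fill n ys acc (temp ++ [y]) (by simp) (by simp at hlen ⊢; omega)]
    simp

theorem pv_main (n : Int) (hn : n ≠ 0) :
    ∀ (k : ℕ) (xs : List Int) (acc : List (List Int)) (temp : List Int),
      temp.length = n.natAbs → xs.length = k * n.natAbs →
      (pvFlushA n (xs.foldl (pvStepA n) (acc, temp))).1 = (acc ++ [temp]) ++ pvChunk n.natAbs k xs
  | 0, xs, acc, temp, ht, hx => by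
    have hxs : xs = [] := List.eq_nil_of_length_eq_zero (by omega)
    have htne : temp ≠ [] := by
      intro h; rw [h] at ht; simp at ht; exact hn (Int.natAbs_eq_zero.mp ht.symm)
    subst hxs
    simp only [List.foldl_nil, pvChunk]
    rw [pvFlushA_iff n]
    simp [htne, ht]
  | k + 1, xs, acc, temp, ht, hx => by
    have hN : 0 < n.natAbs := Int.natAbs_pos.mpr hn
    obtain ⟨x, rest, rfl⟩ : ∃ x rest, xs = x :: rest := by
      cases xs with
      | nil => simp [Nat.succ_mul] at hx; omega
      | cons a l => exact ⟨a, l, rfl⟩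
    have hlen_rest : rest.length = k * n.natAbs + (n.natAbs - 1) := by
      simp [Nat.succ_mul] at hx; omega
    have htne : temp ≠ [] := by
      intro h; rw [h] at ht; simp at ht; omega
    have hstep : pvStepA n (acc, temp) x = (acc ++ [temp], [x]) := by
      unfold pvStepA
      rw [pvFlushA_iff n]
      simp [htne, ht]
    have hsplit : ∀ st : List (List Int) × List Int, rest.foldl (pvStepA n) st =
        (rest.drop (n.natAbs - 1)).foldl (pvStepA n) ((rest.take (n.natAbs - 1)).foldl (pvStepA n) st) := by
      intro st
      rw [← List.foldl_append, List.take_append_drop]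
    have htake : [x] ++ rest.take (n.natAbs - 1) = (x :: rest).take n.natAbs := by
      cases hnn : n.natAbs with
      | zero => omega
      | succ j => simp
    have hdrop : rest.drop (n.natAbs - 1) = (x :: rest).drop n.natAbs := by
      cases hnn : n.natAbs with
      | zero => omega
      | succ j => simp
    rw [List.foldl_cons, hstep, hsplit,
      pv_fill n (rest.take (n.natAbs - 1)) (acc ++ [temp]) [x] (by simp)
        (by simp [hlen_rest]; omega),
      htake, hdrop,
      pv_main n hn k ((x :: rest).drop n.natAbs) (acc ++ [temp]) ((x :: rest).take n.natAbs)
        (by simp; omega) (by simp; omega)]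
    simp [pvChunk]

-- the whole run of A's loop on a nonempty list of length k*|n|
theorem pv_runA (n : Int) (hn : n ≠ 0) (xs : List Int) (k : ℕ) (hk : 0 < k)
    (hx : xs.length = k * n.natAbs) :
    (pvFlushA n (xs.foldl (pvStepA n) ([], []))).1 = pvChunk n.natAbs k xs := by
  have hN : 0 < n.natAbs := Int.natAbs_pos.mpr hn
  obtain ⟨j, rfl⟩ : ∃ j, k = j + 1 := ⟨k - 1, by omega⟩
  obtain ⟨x, rest, rfl⟩ : ∃ x rest, xs = x :: rest := by
    cases xs with
    | nil => simp [Nat.succ_mul] at hx; omega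
    | cons a l => exact ⟨a, l, rfl⟩
  have hlen_rest : rest.length = j * n.natAbs + (n.natAbs - 1) := by
    simp [Nat.succ_mul] at hx; omega
  have hstep : pvStepA n ([], []) x = ([], [x]) := by
    unfold pvStepA
    rw [pvFlushA_iff n]
    simp
  have hsplit : ∀ st : List (List Int) × List Int, rest.foldl (pvStepA n) st =
      (rest.drop (n.natAbs - 1)).foldl (pvStepA n) ((rest.take (n.natAbs - 1)).foldl (pvStepA n) st) := by
    intro st
    rw [← List.foldl_append, List.take_append_drop]
  have htake : [x] ++ rest.take (n.natAbs - 1) = (x :: rest).take n.natAbs := by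
    cases hnn : n.natAbs with
    | zero => omega
    | succ i => simp
  have hdrop : rest.drop (n.natAbs - 1) = (x :: rest).drop n.natAbs := by
    cases hnn : n.natAbs with
    | zero => omega
    | succ i => simp
  rw [List.foldl_cons, hstep, hsplit,
    pv_fill n (rest.take (n.natAbs - 1)) [] [x] (by simp)
      (by simp [hlen_rest]; omega),
    htake, hdrop,
    pv_main n hn j ((x :: rest).drop n.natAbs) [] ((x :: rest).take n.natAbs)
      (by simp; omega) (by simp; omega)]
  simp [pvChunk]

-- A, rewritten as the fold over the list itself
theorem pvA_eq (original : List Int) (m : Int) (n : Int) :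
    one_d_to_two_d_array original m n =
      if m * n ≠ (original.length : Int) then []
      else (pvFlushA n (original.foldl (pvStepA n) ([], []))).1 := by
  unfold one_d_to_two_d_array
  rcases eq_or_ne (m * n) ((original.length : Int)) with h | h
  · simp only [PySem.List.len, h]
    rw [if_neg (by simp), if_neg (by simp)]
    have := PySem.List.foldl_pyRange_pyGetD original 0
      (pvStepA n) (([], []) : List (List Int) × List Int) (a := 0) (by norm_num)
    simp only [pvStepA] at this
    simp only [PySem.List.len, Int.toNat_zero, List.drop_zero] at this
    rw [this]
  · simp [PySem.List.len, h]

-- B's comprehension of slices is the chunk list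
theorem pvB_chunk (N : ℕ) :
    ∀ (k a : ℕ) (xs : List Int),
      (PySem.List.pyRange (a : Int) ((a : Int) + (k : Int))).map
        (fun i => PySem.List.slice xs (some (i * (N : Int))) (some ((i + 1) * (N : Int)))) =
      pvChunk N k (xs.drop (a * N))
  | 0, a, xs => by
    rw [PySem.List.pyRange_one_eq_nil (by simp)]
    simp [pvChunk]
  | k + 1, a, xs => by
    rw [PySem.List.pyRange_one_cons (by push_cast; omega)]
    have hhead : PySem.List.slice xs (some ((a : Int) * N)) (some (((a : Int) + 1) * N)) =
        (xs.drop (a * N)).take N := by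
      have h1 : ((a : Int) * N) = ((a * N : ℕ) : Int) := by push_cast; ring
      have h2 : (((a : Int) + 1) * N) = ((a * N : ℕ) : Int) + (N : Int) := by push_cast; ring
      rw [h1, h2, PySem.List.slice_natCast_add]
    have htail : ((a : Int) + 1) = (((a + 1 : ℕ)) : Int) := by push_cast; ring
    have hcast : (a : Int) + ((k : ℕ) + 1 : ℕ) = ((a + 1 : ℕ) : Int) + (k : ℕ) := by
      push_cast; ring
    rw [List.map_cons, hhead]
    rw [show ((a : Int) + 1 : Int) = ((a + 1 : ℕ) : Int) by push_cast; ring]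
    rw [hcast, pvB_chunk N k (a + 1) xs]
    have : xs.drop ((a + 1) * N) = (xs.drop (a * N)).drop N := by
      rw [List.drop_drop]; ring_nf
    rw [this]
    simp [pvChunk]

-- ===== VERDICT (by name: the statement is the Claim_ definition above) =====
theorem one_d_to_two_d_array_spec : Claim_unchanged_one_d_to_two_d_array := by
  intro original m n _ hD
  unfold one_d_to_two_d_array_alt
  rw [pvA_eq]
  rcases eq_or_ne (m * n) ((original.length : Int)) with heq | hne
  · rcases eq_or_ne original [] with rfl | hnil
    · -- empty input: A's loop never fills temp, B's guard fires
      simp [PySem.List.len, pvFlushA, heq]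
    · -- nonempty input: both sides are the chunk list
      have hpos : (0 : Int) < m * n := by
        rw [heq]
        exact_mod_cast List.length_pos_of_ne_nil hnil
      have hmn : 0 < m ∧ 0 < n := by
        rcases lt_trichotomy m 0 with hm | hm | hm
        · rcases lt_trichotomy n 0 with hn' | hn' | hn'
          · exact absurd ⟨hnil, hm, hn', heq⟩ hD
          · simp [hn'] at hpos
          · nlinarith
        · simp [hm] at hpos
        · rcases lt_trichotomy n 0 with hn' | hn' | hn'
          · nlinarith
          · simp [hn'] at hpos
          · exact ⟨hm, hn'⟩
      obtain ⟨hm, hn'⟩ := hmn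
      have hn0 : n ≠ 0 := by omega
      have hNat : original.length = m.toNat * n.natAbs := by
        have : ((m.toNat * n.natAbs : ℕ) : Int) = m * n := by
          push_cast [Int.toNat_of_nonneg hm.le, Int.natAbs_of_nonneg hn'.le]; ring
        omega
      rw [if_neg (by simp [heq]), if_neg (by simp [PySem.List.len, heq, hnil])]
      rw [pv_runA n hn0 original m.toNat (by omega) hNat]
      have hB := pvB_chunk n.natAbs m.toNat 0 original
      simp only [show ((n.natAbs : ℕ) : Int) = n from by omega,
        show ((m.toNat : ℕ) : Int) = m from by omega,
        Nat.cast_zero, zero_add, Nat.zero_mul, List.drop_zero] at hB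
      exact hB.symm
  · simp [PySem.List.len, hne]

theorem one_d_to_two_d_array_changed : Claim_changed_one_d_to_two_d_array := by
  unfold Claim_changed_one_d_to_two_d_array; decide

theorem one_d_to_two_d_array_tight : Claim_exact_one_d_to_two_d_array := by
  intro original m n _ hD
  obtain ⟨hnil, hm, hn, heq⟩ := hD
  have hn0 : n ≠ 0 := by omega
  have habs : (m * n).natAbs = m.natAbs * n.natAbs := Int.natAbs_mul m n
  have hNat : original.length = m.natAbs * n.natAbs := by
    have h2 : (((m * n).natAbs : ℕ) : Int) = m * n :=
      Int.natAbs_of_nonneg (by rw [heq]; exact Int.natCast_nonneg _)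
    have h3 : ((m.natAbs * n.natAbs : ℕ) : Int) = (original.length : Int) := by
      rw [← habs, h2, heq]
    exact_mod_cast h3.symm
  have hBnil : one_d_to_two_d_array_alt original m n = [] := by
    unfold one_d_to_two_d_array_alt
    rw [if_neg (by simp [PySem.List.len, heq, hnil]),
      PySem.List.pyRange_one_eq_nil (show m ≤ 0 by omega)]
    simp
  rw [hBnil, pvA_eq, if_neg (by simp [heq]),
    pv_runA n hn0 original m.natAbs (by omega) hNat]
  obtain ⟨j, hj⟩ : ∃ j, m.natAbs = j + 1 := ⟨m.natAbs - 1, by omega⟩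
  rw [hj]
  simp [pvChunk]
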